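-- pv_equiv track=rewrite | github.com/AVGenAI/agentverse-clean | sre_servicenow_agent.py | _suggest_preventive_measures
-- ===== SOURCE A (Python) =====
-- from typing import Dict, List, Any, Optional, Tuple
--
-- def _suggest_preventive_measures(root_cause: str, contributing_factors: List[str]) -> List[str]:
--     """Suggest preventive measures based on RCA"""
--     measures = []
--
--     # Generic measures
--     measures.append(f"Add monitoring for early detection of {root_cause}")
--     measures.append("Update runbook with lessons learned")
--
--     # Specific measures based on factors
--     for factor in contributing_factors:
--         if "deployment" in factor.lower():
--             measures.append("Implement canary deployments")
--             measures.append("Add automated rollback triggers")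
--         elif "capacity" in factor.lower():
--             measures.append("Implement auto-scaling policies")
--             measures.append("Set up capacity alerts at 80% threshold")
--         elif "configuration" in factor.lower():
--             measures.append("Add configuration validation tests")
--             measures.append("Implement configuration drift detection")
--
--     return measures
-- ===== SOURCE B (Python) =====
-- _KEYWORDS = ["deployment", "capacity", "configuration"]
-- _SPECIFIC = [
--     ["Implement canary deployments", "Add automated rollback triggers"],
--     ["Implement auto-scaling policies", "Set up capacity alerts at 80% threshold"],
--     ["Add configuration validation tests", "Implement configuration drift detection"],
--     [],  # rank 3 = no keyword found
-- ]
--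
--
-- def _rank(factor):
--     low = factor.lower()
--     return min((i for i, kw in enumerate(_KEYWORDS) if kw in low),
--                default=len(_KEYWORDS))
--
--
-- def _suggest_preventive_measures(root_cause, contributing_factors):
--     ranks = [_rank(f) for f in contributing_factors]
--     return [f"Add monitoring for early detection of {root_cause}",
--             "Update runbook with lessons learned"] \
--         + [m for r in ranks for m in _SPECIFIC[r]]
-- ===== Notes on version B (the rewrite author's own statement) =====
-- stated objective: alternative
-- what changed: Two staged passes replace the per-factor if/elif appends: pass 1 maps each factor to a numeric rank (the minimum index of any keyword it contains, len(_KEYWORDS) if none), pass 2 flattens the rank-indexed measure table rows after the two generic lines; no conditional appends or break remain.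
import Mathlib
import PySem

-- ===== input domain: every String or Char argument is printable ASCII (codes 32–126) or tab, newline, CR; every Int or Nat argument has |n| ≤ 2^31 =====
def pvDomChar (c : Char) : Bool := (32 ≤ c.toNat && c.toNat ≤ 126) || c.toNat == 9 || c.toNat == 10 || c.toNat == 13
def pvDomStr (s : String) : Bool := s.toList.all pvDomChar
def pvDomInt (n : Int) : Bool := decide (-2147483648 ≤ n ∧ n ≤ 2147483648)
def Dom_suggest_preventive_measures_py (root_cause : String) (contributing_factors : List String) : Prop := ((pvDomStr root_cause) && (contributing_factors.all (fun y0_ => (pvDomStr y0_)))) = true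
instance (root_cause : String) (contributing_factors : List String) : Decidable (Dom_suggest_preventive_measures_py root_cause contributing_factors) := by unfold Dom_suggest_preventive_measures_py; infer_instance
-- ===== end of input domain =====

-- B trades the per-factor if/elif appends for two staged passes (factor → numeric rank, then flatten the rank-indexed table); alternative decomposition, same cost.

-- ===== PORT A =====
-- Port of A: if/elif keyword chain, fold over the factors.
def suggest_preventive_measures_py (root_cause : String) (contributing_factors : List String) : List String :=
  contributing_factors.foldl (fun measures factor =>
    if PySem.Str.isIn "deployment" (PySem.Str.lower factor) then
      measures ++ ["Implement canary deployments", "Add automated rollback triggers"]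
    else if PySem.Str.isIn "capacity" (PySem.Str.lower factor) then
      measures ++ ["Implement auto-scaling policies", "Set up capacity alerts at 80% threshold"]
    else if PySem.Str.isIn "configuration" (PySem.Str.lower factor) then
      measures ++ ["Add configuration validation tests", "Implement configuration drift detection"]
    else measures)
    ["Add monitoring for early detection of " ++ root_cause, "Update runbook with lessons learned"]

-- ===== PORT B =====
-- Port of B (Source B): pass 1 maps each factor to a rank = min index of a contained keyword
-- (len(_KEYWORDS) if none); pass 2 flattens the rank-indexed rows of the measure table.
def pvKeywords : List String := ["deployment", "capacity", "configuration"]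

def pvSpecific : List (List String) :=
  [["Implement canary deployments", "Add automated rollback triggers"],
   ["Implement auto-scaling policies", "Set up capacity alerts at 80% threshold"],
   ["Add configuration validation tests", "Implement configuration drift detection"],
   []]

-- _rank: min((i for i, kw in enumerate(_KEYWORDS) if kw in low), default=len(_KEYWORDS))
def pvRank (factor : String) : Int :=
  let low := PySem.Str.lower factor
  match PySem.List.min?
      (((PySem.List.enumerate pvKeywords).filter (fun p => PySem.Str.isIn p.2 low)).map (·.1))
      (fun x => x) with
  | some i => i
  | none => (pvKeywords.length : Int)

def suggest_preventive_measures_py_alt (root_cause : String) (contributing_factors : List String) : List String :=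
  let ranks := contributing_factors.map pvRank
  ["Add monitoring for early detection of " ++ root_cause, "Update runbook with lessons learned"]
    ++ ranks.flatMap (fun r => PySem.List.pyGetD pvSpecific r [])

-- ===== PRECONDITION & SPEC =====
def Spec_suggest_preventive_measures_py (root_cause : String) (contributing_factors : List String) (out : List String) : Prop := out = suggest_preventive_measures_py_alt root_cause contributing_factors
instance (root_cause : String) (contributing_factors : List String) (out : List String) : Decidable (Spec_suggest_preventive_measures_py root_cause contributing_factors out) := by unfold Spec_suggest_preventive_measures_py; infer_instance

-- ===== CLAIM (what is proved, stated in full; the proofs are below) =====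
def Claim_equal_suggest_preventive_measures_py : Prop := ∀ (root_cause : String) (contributing_factors : List String), Dom_suggest_preventive_measures_py root_cause contributing_factors → Spec_suggest_preventive_measures_py root_cause contributing_factors (suggest_preventive_measures_py root_cause contributing_factors)

-- ===== LEMMAS AND PROOFS =====
lemma step_eq (acc : List String) (factor : String) :
    (if PySem.Str.isIn "deployment" (PySem.Str.lower factor) then
      acc ++ ["Implement canary deployments", "Add automated rollback triggers"]
    else if PySem.Str.isIn "capacity" (PySem.Str.lower factor) then
      acc ++ ["Implement auto-scaling policies", "Set up capacity alerts at 80% threshold"]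
    else if PySem.Str.isIn "configuration" (PySem.Str.lower factor) then
      acc ++ ["Add configuration validation tests", "Implement configuration drift detection"]
    else acc)
    = acc ++ PySem.List.pyGetD pvSpecific (pvRank factor) [] := by
  cases h1 : PySem.Str.isIn "deployment" (PySem.Str.lower factor) <;>
  cases h2 : PySem.Str.isIn "capacity" (PySem.Str.lower factor) <;>
  cases h3 : PySem.Str.isIn "configuration" (PySem.Str.lower factor) <;>
  · simp only [PySem.Str.isIn_eq, PySem.Str.toList_lower,
      show ("deployment".toList = ['d','e','p','l','o','y','m','e','n','t']) from rfl,
      show ("capacity".toList = ['c','a','p','a','c','i','t','y']) from rfl,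
      show ("configuration".toList = ['c','o','n','f','i','g','u','r','a','t','i','o','n']) from rfl]
      at h1 h2 h3
    simp [pvRank, pvKeywords, pvSpecific, h1, h2, h3, List.filter_nil,
      PySem.List.enumerate, PySem.List.min?, PySem.List.pyGetD, PySem.List.pyGet?,
      PySem.List.pyIdx?]

-- ===== VERDICT (by name: the statement is the Claim_ definition above) =====
theorem suggest_preventive_measures_py_spec : Claim_equal_suggest_preventive_measures_py := by
  intro root_cause contributing_factors hdom
  clear hdom
  show _ = _
  unfold suggest_preventive_measures_py suggest_preventive_measures_py_alt
  simp only [List.flatMap_map]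
  generalize ["Add monitoring for early detection of " ++ root_cause,
    "Update runbook with lessons learned"] = acc
  rw [← PySem.List.foldl_append_eq_flatMap]
  simp only [step_eq]
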